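-- pv_equiv track=rewrite | github.com/rakesh-050791/DS-Algo | Intermediate/July-2022/25-July-2022.py | solve
-- ===== SOURCE A (Python) =====
-- def solve(A, B):
--     ans = 0
--     prev_subarray_count = 0
--
--     for i in range(A):
--         if B[i] == 1:
--             current_subarray_count = i+1 # when ith element(rightMostElement) = 1. no. of subarrays= i+1
--             ans += current_subarray_count
--             prev_subarray_count = current_subarray_count
--
--         else:
--             ans += prev_subarray_count # when ith element = 0. then no of subarrays = previousSubarrayCount
--
--     return(ans)
-- ===== SOURCE B (Python) =====
-- def solve(A, B):
--     # total subarrays of the length-A prefix, minus those containing no 1: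
--     # each maximal run of r consecutive non-1 values contributes r*(r+1)//2 bad subarrays
--     n = max(A, 0)  # a nonpositive count means an empty prefix
--     total = n * (n + 1) // 2
--     bad = 0
--     run = 0
--     for v in B[:n]:
--         if v == 1:
--             bad += run * (run + 1) // 2
--             run = 0
--         else:
--             run += 1
--     bad += run * (run + 1) // 2
--     return total - bad
-- ===== Notes on version B (the rewrite author's own statement) =====
-- stated objective: alternative
-- what changed: A walks indices 0..A-1 carrying the count of subarray starts up to the last seen 1 (prev_subarray_count) and sums it per position; B counts complementarily: grand total n*(n+1)//2 minus r*(r+1)//2 for each maximal run of non-1 values in the prefix B[:n], iterating over the values (no indexing).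
import Mathlib
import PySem

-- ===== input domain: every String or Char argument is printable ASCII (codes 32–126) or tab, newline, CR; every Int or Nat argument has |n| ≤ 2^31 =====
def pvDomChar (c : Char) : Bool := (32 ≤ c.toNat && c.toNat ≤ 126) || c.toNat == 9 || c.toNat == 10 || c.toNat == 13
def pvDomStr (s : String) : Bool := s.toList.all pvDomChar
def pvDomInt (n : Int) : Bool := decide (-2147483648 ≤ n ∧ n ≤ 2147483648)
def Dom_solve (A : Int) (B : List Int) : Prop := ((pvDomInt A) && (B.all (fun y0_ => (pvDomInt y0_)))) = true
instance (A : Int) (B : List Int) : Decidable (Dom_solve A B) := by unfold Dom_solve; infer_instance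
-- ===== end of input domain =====

-- B counts complementarily (total subarrays of the prefix minus those inside
-- maximal non-1 runs), iterating over the prefix values instead of A's indexed
-- loop with a carried prev_subarray_count; objective: alternative (same O(A)).

-- ===== PORT A =====
-- loop state (ans, prev_subarray_count); none = IndexError from B[i]
def solveStepA (B : List Int) (st : Option (Int × Int)) (i : Int) : Option (Int × Int) :=
  match st with
  | none => none
  | some (ans, prev) =>
    match PySem.List.pyGet? B i with
    | none => none
    | some v => if v = 1 then some (ans + (i + 1), i + 1) else some (ans + prev, prev)

def solve (A : Int) (B : List Int) : Int :=
  match (PySem.List.pyRange 0 A 1).foldl (solveStepA B) (some (0, 0)) with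
  | some (ans, _) => ans
  | none => 0

-- ===== PORT B =====
-- per-value step of the run-counting loop; state (bad, run)
def solveStepB (st : Int × Int) (v : Int) : Int × Int :=
  if v = 1 then (st.1 + PySem.Int.floordiv (st.2 * (st.2 + 1)) 2, 0)
  else (st.1, st.2 + 1)

def solve_alt (A : Int) (B : List Int) : Int :=
  let n := max A 0
  let total := PySem.Int.floordiv (n * (n + 1)) 2
  let st := (PySem.List.slice B none (some n)).foldl solveStepB (0, 0)
  total - (st.1 + PySem.Int.floordiv (st.2 * (st.2 + 1)) 2)

-- ===== PRECONDITION & SPEC =====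
-- Pre_ excludes only A > len(B), where A raises IndexError at B[i].
def Pre_solve (A : Int) (B : List Int) : Prop := A ≤ B.length
instance (A : Int) (B : List Int) : Decidable (Pre_solve A B) := by unfold Pre_solve; infer_instance
def pvWitness_solve : Int × List Int := (3, [0, 1, 0])

def Spec_solve (A : Int) (B : List Int) (out : Int) : Prop := out = solve_alt A B
instance (A : Int) (B : List Int) (out : Int) : Decidable (Spec_solve A B out) := by unfold Spec_solve; infer_instance

-- ===== CLAIM (what is proved, stated in full; the proofs are below) =====
def Claim_equal_solve : Prop := ∀ (A : Int) (B : List Int), Dom_solve A B → Pre_solve A B → Spec_solve A B (solve A B)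

-- ===== LEMMAS AND PROOFS =====

-- triangular number m*(m+1)//2, as both ports compute it
def pvT (m : Int) : Int := PySem.Int.floordiv (m * (m + 1)) 2

theorem pvT_succ (m : Int) : pvT (m + 1) = pvT m + (m + 1) := by
  unfold pvT
  rw [PySem.Int.floordiv_eq_ediv_of_pos (by norm_num), PySem.Int.floordiv_eq_ediv_of_pos (by norm_num)]
  have hev : m * (m + 1) % 2 = 0 := Int.even_iff.mp (Int.even_mul_succ_self m)
  have h2 : (m + 1) * (m + 1 + 1) = m * (m + 1) + 2 * (m + 1) := by ring
  rw [h2]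
  omega

theorem pvT_zero : pvT 0 = 0 := by decide

theorem pv_loop_inv (B : List Int) : ∀ (n : Nat), (n : Int) ≤ B.length →
    ∃ p : Int × Int,
      (PySem.List.pyRange 0 (n : Int) 1).foldl (solveStepA B) (some (0, 0)) = some p ∧
      (let q := (B.take n).foldl solveStepB (0, 0);
       0 ≤ q.2 ∧ q.2 = (n : Int) - p.2 ∧ p.1 + q.1 + pvT q.2 = pvT (n : Int)) := by
  intro n
  induction n with
  | zero =>
    intro _
    refine ⟨(0, 0), ?_, by simp [pvT_zero]⟩
    rw [PySem.List.pyRange_one_eq_nil (by norm_num)]; rfl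
  | succ n ih =>
    intro h
    push_cast at h ⊢
    obtain ⟨p, hA, hq, hrun, hsum⟩ := ih (by omega)
    have hn : n < B.length := by omega
    have hget : PySem.List.pyGet? B ((n : Nat) : Int) = some B[n] := by
      simp [PySem.List.pyGet?_natCast, List.getElem?_eq_getElem hn]
    have htake : B.take (n + 1) = B.take n ++ [B[n]] := List.take_succ_eq_append_getElem hn
    rw [PySem.List.pyRange_one_succ_right (by positivity), List.foldl_append, hA, htake,
        List.foldl_append]
    simp only [List.foldl_cons, List.foldl_nil, solveStepA, solveStepB, hget]
    set q := (B.take n).foldl solveStepB (0, 0) with hqdef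
    by_cases hv : B[n] = (1 : Int)
    · refine ⟨(p.1 + ((n : Int) + 1), (n : Int) + 1), by simp [hv], ?_⟩
      simp only [hv, reduceIte]
      have hTq : PySem.Int.floordiv (q.2 * (q.2 + 1)) 2 = pvT q.2 := rfl
      have hTs := pvT_succ (n : Int)
      have h0 := pvT_zero
      rw [hTq]
      exact ⟨le_refl 0, by omega, by omega⟩
    · refine ⟨(p.1 + p.2, p.2), by simp [hv], ?_⟩
      simp only [hv, reduceIte]
      have hTs := pvT_succ (n : Int)
      have hTr := pvT_succ q.2
      exact ⟨by omega, by omega, by omega⟩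

-- ===== VERDICT (by name: the statement is the Claim_ definition above) =====
theorem solve_spec : Claim_equal_solve := by
  intro A B _ hlen
  unfold Pre_solve at hlen
  by_cases h0 : 0 ≤ A
  case neg =>
    have hA0 : A ≤ 0 := by omega
    have hmax : max A 0 = ((0 : Nat) : Int) := by simp; omega
    simp only [Spec_solve, solve, solve_alt]
    rw [PySem.List.pyRange_one_eq_nil hA0, hmax, PySem.List.slice_to_natCast]
    norm_num [PySem.Int.floordiv]
  obtain ⟨n, rfl⟩ : ∃ n : Nat, A = (n : Int) := ⟨A.toNat, by omega⟩
  have hmax : max ((n : Nat) : Int) 0 = ((n : Nat) : Int) := by omega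
  obtain ⟨p, hA, hq, hrun, hsum⟩ := pv_loop_inv B n hlen
  simp only [Spec_solve, solve, solve_alt]
  rw [hA, hmax, PySem.List.slice_to_natCast]
  have h1 : PySem.Int.floordiv ((n : Int) * ((n : Int) + 1)) 2 = pvT (n : Int) := rfl
  set q := (B.take n).foldl solveStepB (0, 0)
  have h2 : PySem.Int.floordiv (q.2 * (q.2 + 1)) 2 = pvT q.2 := rfl
  simp only [h1, h2]
  omega
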